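-- pv_equiv track=rewrite | github.com/anddriex/search-algorithms | maze/aStarMaze.py | createVertexDict
-- ===== SOURCE A (Python) =====
-- def createVertexDict(rows,cols):
--     c = 0
--     vertexDict = {}
--     for i in range(rows):
--         for j in range(cols):
--             c += 1
--             vertexDict[str(c)] = (i,j)
--     return vertexDict
-- ===== SOURCE B (Python) =====
-- def createVertexDict(rows, cols):
--     if rows <= 0 or cols <= 0:
--         return {}
--     vertexDict = {}
--     for c in range(1, rows * cols + 1):
--         i, j = divmod(c - 1, cols)
--         vertexDict[str(c)] = (i, j)
--     return vertexDict
-- ===== Notes on version B (the rewrite author's own statement) =====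
-- stated objective: alternative
-- what changed: Replaces the two nested row/column loops with an incremented counter by a single loop over the flat index c in range(1, rows*cols+1), recovering the coordinates with divmod(c-1, cols); non-positive dimensions return the empty dict up front.
import Mathlib
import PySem

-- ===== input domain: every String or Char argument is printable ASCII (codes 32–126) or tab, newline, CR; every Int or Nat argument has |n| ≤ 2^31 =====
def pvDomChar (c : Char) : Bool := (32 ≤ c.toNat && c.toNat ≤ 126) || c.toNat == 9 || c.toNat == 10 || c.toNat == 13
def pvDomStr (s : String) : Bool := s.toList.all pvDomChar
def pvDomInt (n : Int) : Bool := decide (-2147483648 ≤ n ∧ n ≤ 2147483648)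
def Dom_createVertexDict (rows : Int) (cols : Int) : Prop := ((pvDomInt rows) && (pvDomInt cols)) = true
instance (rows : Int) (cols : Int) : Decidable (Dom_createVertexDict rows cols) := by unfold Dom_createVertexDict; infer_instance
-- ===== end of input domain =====

-- B replaces A's two nested loops plus counter with one flat-index loop using divmod: an alternative decomposition, same cost.


-- ===== PORT A =====
-- literal transliteration of A: counter c and dict threaded through two nested range loops
def createVertexDict (rows : Int) (cols : Int) : List (String × Int × Int) :=
  let st :=
    (PySem.List.pyRange 0 rows 1).foldl
      (fun (st : Int × PySem.Dict String (Int × Int)) i =>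
        (PySem.List.pyRange 0 cols 1).foldl
          (fun st j => (st.1 + 1, st.2.insert (PySem.Int.toStr (st.1 + 1)) (i, j)))
          st)
      (0, PySem.Dict.empty)
  st.2.items

-- ===== PORT B =====
-- literal transliteration of B: one flat loop over c, coordinates by divmod(c-1, cols)
def createVertexDict_alt (rows : Int) (cols : Int) : List (String × Int × Int) :=
  if rows ≤ 0 ∨ cols ≤ 0 then []
  else
    ((PySem.List.pyRange 1 (rows * cols + 1) 1).foldl
      (fun (d : PySem.Dict String (Int × Int)) c =>
        d.insert (PySem.Int.toStr c)
          (PySem.Int.floordiv (c - 1) cols, PySem.Int.mod (c - 1) cols))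
      PySem.Dict.empty).items

-- ===== PRECONDITION & SPEC =====
def Spec_createVertexDict (rows : Int) (cols : Int) (out : List (String × Int × Int)) : Prop := out = createVertexDict_alt rows cols
instance (rows : Int) (cols : Int) (out : List (String × Int × Int)) : Decidable (Spec_createVertexDict rows cols out) := by unfold Spec_createVertexDict; infer_instance

-- ===== CLAIM (what is proved, stated in full; the proofs are below) =====
def Claim_equal_createVertexDict : Prop := ∀ (rows : Int) (cols : Int), Dom_createVertexDict rows cols → Spec_createVertexDict rows cols (createVertexDict rows cols)

-- ===== LEMMAS AND PROOFS =====

-- B's flat step, with cols fixed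
def pvStepB (cols : Int) (d : PySem.Dict String (Int × Int)) (c : Int) : PySem.Dict String (Int × Int) :=
  d.insert (PySem.Int.toStr c) (PySem.Int.floordiv (c - 1) cols, PySem.Int.mod (c - 1) cols)

-- inner loop of A over one row i, started at counter c0 = i*cols, is B's flat loop on the matching segment
lemma pv_inner (cols : Int) (i : Int) (C : Nat) (hC : (C : Int) ≤ cols)
    (d : PySem.Dict String (Int × Int)) :
    (List.range C).foldl
      (fun (st : Int × PySem.Dict String (Int × Int)) (j : Nat) =>
        (st.1 + 1, st.2.insert (PySem.Int.toStr (st.1 + 1)) (i, (j : Int))))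
      (i * cols, d)
    = (i * cols + C, (PySem.List.pyRange (i * cols + 1) (i * cols + C + 1) 1).foldl (pvStepB cols) d) := by
  induction C with
  | zero =>
      simp
  | succ C ih =>
      have hC' : (C : Int) ≤ cols := by push_cast at hC ⊢; omega
      rw [List.range_succ, List.foldl_append, ih hC']
      have hcols : 0 < cols := by push_cast at hC; omega
      have hsplit : PySem.List.pyRange (i * cols + 1) (i * cols + (C + 1 : Nat) + 1) 1
          = PySem.List.pyRange (i * cols + 1) (i * cols + C + 1) 1 ++ [i * cols + C + 1] := by
        have h := PySem.List.pyRange_one_succ_right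
          (a := i * cols + 1) (b := i * cols + C + 1) (by omega)
        push_cast
        rw [show i * cols + ((C : Int) + 1) + 1 = (i * cols + (C : Int) + 1) + 1 by ring, h]
      rw [hsplit, List.foldl_append]
      simp only [List.foldl_cons, List.foldl_nil, pvStepB]
      have hfd : PySem.Int.floordiv (i * cols + (C : Int) + 1 - 1) cols = i := by
        rw [PySem.Int.floordiv_eq_iff_of_pos hcols]
        push_cast at hC
        have h0 : (0 : Int) ≤ (C : Int) := Int.natCast_nonneg C
        have hx : (i + 1) * cols = i * cols + cols := by ring
        constructor
        · linarith
        · linarith [hx]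
      have hmd : PySem.Int.mod (i * cols + (C : Int) + 1 - 1) cols = (C : Int) := by
        have h := PySem.Int.floordiv_mul_add_mod (i * cols + (C : Int) + 1 - 1) cols
        rw [hfd] at h
        omega
      rw [hfd, hmd]
      have hc1 : ((C + 1 : Nat) : Int) = (C : Int) + 1 := by push_cast; ring
      rw [hc1, show i * cols + ((C : Int) + 1) = i * cols + (C : Int) + 1 by ring]

-- identity outer step when cols ≤ 0
lemma pv_foldl_id {α β : Type} (l : List β) (x : α) :
    l.foldl (fun a (_ : β) => a) x = x := by
  induction l <;> simp_all

-- whole of A's nested fold, for positive cols, as B's flat fold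
lemma pv_outer (cols : Int) (hcols : 0 < cols) (R : Nat) :
    (List.range R).foldl
      (fun (st : Int × PySem.Dict String (Int × Int)) (i : Nat) =>
        (PySem.List.pyRange 0 cols 1).foldl
          (fun st j => (st.1 + 1, st.2.insert (PySem.Int.toStr (st.1 + 1)) ((i : Int), j)))
          st)
      (0, PySem.Dict.empty)
    = ((R : Int) * cols,
       (PySem.List.pyRange 1 ((R : Int) * cols + 1) 1).foldl (pvStepB cols) PySem.Dict.empty) := by
  induction R with
  | zero =>
      simp
  | succ R ih =>
      rw [List.range_succ, List.foldl_append, ih]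
      simp only [List.foldl_cons, List.foldl_nil]
      have hrng : PySem.List.pyRange 0 cols 1
          = (List.range cols.toNat).map (fun (k : Nat) => (k : Int)) := by
        rw [PySem.List.pyRange_one]
        simp
      rw [hrng, List.foldl_map]
      have := pv_inner cols (R : Int) cols.toNat (by omega) 
        ((PySem.List.pyRange 1 ((R : Int) * cols + 1) 1).foldl (pvStepB cols) PySem.Dict.empty)
      rw [this]
      have htn : ((cols.toNat : Int)) = cols := by omega
      rw [htn]
      have hsplit : PySem.List.pyRange 1 (((R : Nat) + 1 : Int) * cols + 1) 1
          = PySem.List.pyRange 1 ((R : Int) * cols + 1) 1 ++ PySem.List.pyRange ((R : Int) * cols + 1) ((R : Int) * cols + cols + 1) 1 := by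
        have h1 : (1 : Int) ≤ (R : Int) * cols + 1 := by
          have : (0 : Int) ≤ (R : Int) * cols := mul_nonneg (Int.natCast_nonneg R) hcols.le
          omega
        have h2 : (R : Int) * cols + 1 ≤ (R : Int) * cols + cols + 1 := by omega
        have h := PySem.List.pyRange_one_append 1 ((R : Int) * cols + 1) ((R : Int) * cols + cols + 1) h1 h2
        rw [show ((R : Nat) + 1 : Int) * cols + 1 = (R : Int) * cols + cols + 1 by ring, h]
      have hRs : (((R + 1 : Nat)) : Int) = (R : Int) + 1 := by push_cast; ring
      rw [hRs, show ((R : Int) + 1) * cols + 1 = ((R : Nat) + 1 : Int) * cols + 1 by ring,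
        hsplit, List.foldl_append]
      rw [show ((R : Int) + 1) * cols = (R : Int) * cols + cols by ring]

-- ===== VERDICT (by name: the statement is the Claim_ definition above) =====
theorem createVertexDict_spec : Claim_equal_createVertexDict := by
  intro rows cols _
  unfold Spec_createVertexDict createVertexDict createVertexDict_alt
  by_cases hr : rows ≤ 0
  · simp only [PySem.List.pyRange_one_eq_nil (by omega : rows ≤ 0), List.foldl_nil,
      hr, true_or, if_true]
    rfl
  · by_cases hc : cols ≤ 0
    · have hinner : PySem.List.pyRange 0 cols 1 = [] :=
        PySem.List.pyRange_one_eq_nil (by omega)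
      simp only [hinner, List.foldl_nil, hc, or_true, if_true]
      rw [pv_foldl_id]
      rfl
    · -- both positive
      have hcols : 0 < cols := by omega
      have hrng : PySem.List.pyRange 0 rows 1
          = (List.range rows.toNat).map (fun (k : Nat) => (k : Int)) := by
        rw [PySem.List.pyRange_one]; simp
      rw [hrng, List.foldl_map]
      rw [pv_outer cols hcols rows.toNat]
      have htn : ((rows.toNat : Int)) = rows := by omega
      rw [htn]
      simp only [hr, hc, or_self, if_false]
      rfl
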